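-- pv_equiv track=rewrite | github.com/wang264/leetcode_practice | mianshi_bakelai/wuti_1.py | func
-- ===== SOURCE A (Python) =====
-- def func(S: str) -> int:
--     max_distance = -1
--     for i in range(0, len(S) - 1):
--         pattern = S[i:i + 2]
--         for j in range(i + 1, len(S) - 1):
--             if pattern == S[j:j + 2]:
--                 max_distance = max(j - i, max_distance)
--
--     return max_distance
-- ===== SOURCE B (Python) =====
-- def func(S: str) -> int:
--     first = {}
--     best = -1
--     for j in range(len(S) - 1):
--         p = S[j:j + 2]
--         i = first.get(p)
--         if i is not None:
--             if j - i > best: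
--                 best = j - i
--         else:
--             first[p] = j
--     return best
-- ===== Notes on version B (the rewrite author's own statement) =====
-- stated objective: faster
-- what changed: Replaced A's nested scan over all index pairs (comparing 2-char slices) by a single pass that stores the first occurrence index of each 2-char pattern in a dict and maximizes j minus that first index.
import Mathlib
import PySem

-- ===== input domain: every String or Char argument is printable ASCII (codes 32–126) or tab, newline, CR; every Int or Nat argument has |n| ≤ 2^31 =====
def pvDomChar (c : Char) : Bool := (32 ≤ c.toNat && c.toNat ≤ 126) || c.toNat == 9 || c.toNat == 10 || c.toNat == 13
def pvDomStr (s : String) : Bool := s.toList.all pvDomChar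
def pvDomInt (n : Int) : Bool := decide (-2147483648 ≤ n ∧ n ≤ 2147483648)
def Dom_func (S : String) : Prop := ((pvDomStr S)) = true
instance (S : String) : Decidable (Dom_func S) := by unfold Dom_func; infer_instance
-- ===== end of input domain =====

-- B replaces A's O(n^2) nested scan over all pairs of 2-char patterns by a single pass that
-- records the first occurrence index of each pattern in a dict (objective: faster, asymptotic).

-- ===== PORT A =====
def func (S : String) : Int :=
  (PySem.List.pyRange 0 (PySem.Str.len S - 1) 1).foldl
    (fun md i =>
      let pattern := PySem.Str.slice S (some i) (some (i + 2))
      (PySem.List.pyRange (i + 1) (PySem.Str.len S - 1) 1).foldl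
        (fun md j =>
          if pattern == PySem.Str.slice S (some j) (some (j + 2)) then max (j - i) md else md)
        md)
    (-1)

-- ===== PORT B =====
def func_alt (S : String) : Int :=
  ((PySem.List.pyRange 0 (PySem.Str.len S - 1) 1).foldl
    (fun (st : PySem.Dict String Int × Int) j =>
      let p := PySem.Str.slice S (some j) (some (j + 2))
      match st.1.get? p with
      | some i => (st.1, if j - i > st.2 then j - i else st.2)
      | none => (st.1.insert p j, st.2))
    (PySem.Dict.empty, -1)).2

-- ===== PRECONDITION & SPEC =====
def Spec_func (S : String) (out : Int) : Prop := out = func_alt S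
instance (S : String) (out : Int) : Decidable (Spec_func S out) := by unfold Spec_func; infer_instance

-- ===== CLAIM (what is proved, stated in full; the proofs are below) =====
def Claim_equal_func : Prop := ∀ (S : String), Dom_func S → Spec_func S (func S)

-- ===== LEMMAS AND PROOFS =====

-- the 2-char pattern starting at index i
def pvPat (S : String) (i : Int) : String := PySem.Str.slice S (some i) (some (i + 2))

-- B's loop body, named for the proofs (definitionally the lambda in func_alt)
def pvStep (S : String) (st : PySem.Dict String Int × Int) (j : Int) :
    PySem.Dict String Int × Int :=
  match st.1.get? (pvPat S j) with
  | some i => (st.1, if j - i > st.2 then j - i else st.2)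
  | none => (st.1.insert (pvPat S j) j, st.2)

-- all candidate distances j - i for pairs i < j < b with equal patterns
def pvCands (S : String) (b : Int) : List Int :=
  (PySem.List.pyRange 0 b 1).flatMap (fun i =>
    ((PySem.List.pyRange (i + 1) b 1).filter
        (fun j => pvPat S i == pvPat S j)).map (fun j => j - i))

-- a conditional running max is a max-fold over the filtered, mapped list
theorem pv_foldl_if_max (p : Int → Bool) (f : Int → Int) (l : List Int) (acc : Int) :
    l.foldl (fun md j => if p j then max (f j) md else md) acc
      = ((l.filter p).map f).foldl max acc := by
  induction l generalizing acc with
  | nil => rfl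
  | cons x xs ih =>
    by_cases h : p x
    · simp only [List.foldl_cons, h, if_true, List.filter_cons_of_pos, List.map_cons]
      rw [ih, max_comm (f x) acc]
    · simp only [List.foldl_cons, h, Bool.false_eq_true, if_false, List.filter_cons_of_neg,
        not_false_iff]
      exact ih acc

-- a nested max-fold is a max-fold over the flattened candidate list
theorem pv_foldl_nested (g : Int → List Int) (l : List Int) (acc : Int) :
    l.foldl (fun md i => (g i).foldl max md) acc = (l.flatMap g).foldl max acc := by
  induction l generalizing acc with
  | nil => rfl
  | cons x xs ih => simp [ih, List.foldl_append]

theorem pv_funcA_eq_cands (S : String) :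
    func S = (pvCands S (PySem.Str.len S - 1)).foldl max (-1) := by
  unfold func pvCands
  rw [← pv_foldl_nested]
  apply PySem.List.foldl_congr_mem
  intro acc i _
  simpa [pvPat] using pv_foldl_if_max (fun j => pvPat S i == pvPat S j) (fun j => j - i)
    (PySem.List.pyRange (i + 1) (PySem.Str.len S - 1) 1) acc

theorem pv_foldl_max_le (l : List Int) (acc m : Int) (h0 : acc ≤ m)
    (h : ∀ x ∈ l, x ≤ m) : l.foldl max acc ≤ m := by
  induction l generalizing acc with
  | nil => exact h0
  | cons x xs ih =>
    refine ih (max acc x) (max_le h0 (h x (by simp))) ?_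
    intro y hy
    exact h y (List.mem_cons_of_mem _ hy)

theorem pv_foldl_max_eq (l : List Int) (acc m : Int) (hm : m ∈ l)
    (h : ∀ x ∈ l, x ≤ m) : l.foldl max acc = max acc m := by
  refine le_antisymm (pv_foldl_max_le l acc (max acc m) (le_max_left _ _)
    (fun x hx => le_trans (h x hx) (le_max_right _ _))) ?_
  exact max_le (PySem.List.le_foldl_max l acc).1 ((PySem.List.le_foldl_max l acc).2 m hm)

-- flatMap of pointwise appends is a permutation of the two flatMaps concatenated
theorem pv_flatMap_append_perm (l : List Int) (g e : Int → List Int) :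
    (l.flatMap (fun i => g i ++ e i)).Perm (l.flatMap g ++ l.flatMap e) := by
  induction l with
  | nil => simp
  | cons x xs ih =>
    rw [List.perm_iff_count]
    intro a
    have h := ih.count_eq a
    simp only [List.flatMap_cons, List.count_append] at h ⊢
    omega

-- the candidate list one step further: old candidates plus the pairs ending at k (up to permutation)
theorem pv_cands_succ (S : String) (k : Nat) :
    (pvCands S ((k : Int) + 1)).Perm
      (pvCands S k ++ (PySem.List.pyRange 0 k 1).flatMap
        (fun i => if pvPat S i == pvPat S (k : Int) then [(k : Int) - i] else [])) := by
  unfold pvCands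
  rw [PySem.List.pyRange_one_succ_right (by exact_mod_cast Int.natCast_nonneg k)]
  rw [List.flatMap_append]
  have hlast : (([(k : Int)]).flatMap (fun i =>
      ((PySem.List.pyRange (i + 1) ((k : Int) + 1) 1).filter
        (fun j => pvPat S i == pvPat S j)).map (fun j => j - i))) = [] := by
    simp [PySem.List.pyRange_one_eq_nil]
  rw [hlast, List.append_nil]
  have hsplit : ∀ i ∈ PySem.List.pyRange 0 (k : Int) 1,
      ((PySem.List.pyRange (i + 1) ((k : Int) + 1) 1).filter
        (fun j => pvPat S i == pvPat S j)).map (fun j => j - i)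
      = ((PySem.List.pyRange (i + 1) (k : Int) 1).filter
          (fun j => pvPat S i == pvPat S j)).map (fun j => j - i)
        ++ (if pvPat S i == pvPat S (k : Int) then [(k : Int) - i] else []) := by
    intro i hi
    rw [PySem.List.mem_pyRange_one] at hi
    rw [PySem.List.pyRange_one_succ_right (by omega), List.filter_append, List.map_append]
    by_cases h : pvPat S i == pvPat S (k : Int) <;> simp [h]
  rw [List.flatMap_congr hsplit]
  exact pv_flatMap_append_perm _ _ _

-- the invariant of B's single pass, after processing indices 0 .. k-1:
-- the dict maps each pattern to its first occurrence, and the best so far is the max candidate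
def pvInv (S : String) (k : Nat) : Prop :=
  let st := (PySem.List.pyRange 0 (k : Int) 1).foldl (pvStep S) (PySem.Dict.empty, -1)
  (∀ p i, st.1.get? p = some i ↔
      (0 ≤ i ∧ i < (k : Int) ∧ pvPat S i = p ∧
        ∀ i', 0 ≤ i' → i' < i → pvPat S i' ≠ p))
    ∧ (∀ p, st.1.get? p = none → ∀ i, 0 ≤ i → i < (k : Int) → pvPat S i ≠ p)
    ∧ st.2 = (pvCands S (k : Int)).foldl max (-1)

theorem pv_inv (S : String) (k : Nat) : pvInv S k := by
  induction k with
  | zero =>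
    have h0 : (PySem.List.pyRange 0 ((0 : Nat) : Int) 1) = [] :=
      PySem.List.pyRange_one_eq_nil (by simp)
    refine ⟨?_, ?_, ?_⟩ <;> simp only [h0, List.foldl_nil]
    · intro p i
      rw [PySem.Dict.get?_empty]
      constructor
      · intro h; simp at h
      · rintro ⟨hge, hlt, -⟩; exfalso; omega
    · intro p _ i hge hlt _; omega
    · simp [pvCands]
  | succ k ih =>
    obtain ⟨hdict, hnone, hbest⟩ := ih
    have hrange : PySem.List.pyRange 0 ((k : Int) + 1) 1
        = PySem.List.pyRange 0 (k : Int) 1 ++ [(k : Int)] :=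
      PySem.List.pyRange_one_succ_right (by exact_mod_cast Int.natCast_nonneg k)
    set st := (PySem.List.pyRange 0 (k : Int) 1).foldl (pvStep S) (PySem.Dict.empty, -1) with hst
    have hcast : ((k + 1 : Nat) : Int) = (k : Int) + 1 := by push_cast; ring
    have hfold : (PySem.List.pyRange 0 ((k + 1 : Nat) : Int) 1).foldl (pvStep S)
        (PySem.Dict.empty, -1) = pvStep S st (k : Int) := by
      rw [hcast, hrange, List.foldl_append, List.foldl_cons, List.foldl_nil]
    have hmax : ((pvCands S ((k : Int) + 1)).foldl max (-1) : Int)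
        = (pvCands S (k : Int) ++ (PySem.List.pyRange 0 (k : Int) 1).flatMap
            (fun i => if pvPat S i == pvPat S (k : Int) then [(k : Int) - i] else [])).foldl
            max (-1) := List.Perm.foldl_op_eq (pv_cands_succ S k)
    cases hget : st.1.get? (pvPat S (k : Int)) with
    | some i0 =>
      obtain ⟨hi00, hi0k, hi0pat, hi0min⟩ := (hdict _ i0).mp hget
      have hstep : pvStep S st (k : Int)
          = (st.1, if (k : Int) - i0 > st.2 then (k : Int) - i0 else st.2) := by
        unfold pvStep
        rw [hget]
      refine ⟨?_, ?_, ?_⟩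
      · -- dict part
        intro p i
        rw [hfold, hstep]
        dsimp only
        rw [hdict, hcast]
        constructor
        · rintro ⟨h0, hk, hpat, hmin⟩
          exact ⟨h0, by omega, hpat, hmin⟩
        · rintro ⟨h0, hk, hpat, hmin⟩
          refine ⟨h0, ?_, hpat, hmin⟩
          by_cases h : i < (k : Int)
          · exact h
          · exfalso
            have hik : i = (k : Int) := by omega
            exact hmin i0 hi00 (by omega) (by rw [hi0pat, ← hik, hpat])
      · -- none part
        intro p hp i h0 hik
        rw [hfold, hstep] at hp
        dsimp only at hp
        rw [hcast] at hik
        by_cases h : i < (k : Int)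
        · exact hnone p hp i h0 h
        · have hik' : i = (k : Int) := by omega
          subst hik'
          intro hpat
          rw [hpat, hp] at hget
          simp at hget
      · -- best part
        rw [hfold, hstep]
        dsimp only
        rw [hcast, hmax, List.foldl_append, ← hbest]
        have hmem : (k : Int) - i0 ∈ (PySem.List.pyRange 0 (k : Int) 1).flatMap
            (fun i => if pvPat S i == pvPat S (k : Int) then [(k : Int) - i] else []) := by
          simp only [List.mem_flatMap]
          refine ⟨i0, ?_, ?_⟩
          · rw [PySem.List.mem_pyRange_one]; omega
          · simp [hi0pat]
        have hub : ∀ x ∈ (PySem.List.pyRange 0 (k : Int) 1).flatMap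
            (fun i => if pvPat S i == pvPat S (k : Int) then [(k : Int) - i] else []),
            x ≤ (k : Int) - i0 := by
          intro x hx
          simp only [List.mem_flatMap] at hx
          obtain ⟨i, hi, hxi⟩ := hx
          rw [PySem.List.mem_pyRange_one] at hi
          by_cases h : pvPat S i == pvPat S (k : Int)
          · simp only [h, if_true, List.mem_singleton] at hxi
            subst hxi
            have : ¬ i < i0 := fun hlt => hi0min i hi.1 hlt (beq_iff_eq.mp h)
            omega
          · simp [h] at hxi
        rw [pv_foldl_max_eq _ _ _ hmem hub]
        rcases max_cases st.2 ((k : Int) - i0) with ⟨he, _⟩ | ⟨he, _⟩ <;> rw [he] <;>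
          split_ifs <;> omega
    | none =>
      have hstep : pvStep S st (k : Int)
          = (st.1.insert (pvPat S (k : Int)) (k : Int), st.2) := by
        unfold pvStep
        rw [hget]
      have hnew : ∀ i, 0 ≤ i → i < (k : Int) → pvPat S i ≠ pvPat S (k : Int) :=
        hnone _ hget
      refine ⟨?_, ?_, ?_⟩
      · -- dict part
        intro p i
        rw [hfold, hstep]
        dsimp only
        rw [PySem.Dict.get?_insert, hcast]
        by_cases hp : p = pvPat S (k : Int)
        · simp only [hp, if_true, Option.some.injEq]
          constructor
          · rintro rfl
            exact ⟨by exact_mod_cast Int.natCast_nonneg k, by omega, rfl,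
              fun i' h0 hik hpat => hnew i' h0 hik hpat⟩
          · rintro ⟨h0, hk, hpat, hmin⟩
            by_cases h : i < (k : Int)
            · exact absurd hpat (hnew i h0 h)
            · omega
        · simp only [hp, if_false]
          rw [hdict]
          constructor
          · rintro ⟨h0, hk, hpat, hmin⟩
            exact ⟨h0, by omega, hpat, hmin⟩
          · rintro ⟨h0, hk, hpat, hmin⟩
            refine ⟨h0, ?_, hpat, hmin⟩
            by_cases h : i < (k : Int)
            · exact h
            · exfalso
              have hik : i = (k : Int) := by omega
              exact hp (by rw [← hpat, hik])
      · -- none part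
        intro p hp i h0 hik
        rw [hfold, hstep] at hp
        dsimp only at hp
        rw [PySem.Dict.get?_insert] at hp
        rw [hcast] at hik
        by_cases hpk : p = pvPat S (k : Int)
        · simp [hpk] at hp
        · simp only [hpk, if_false] at hp
          by_cases h : i < (k : Int)
          · exact hnone p hp i h0 h
          · have hik' : i = (k : Int) := by omega
            subst hik'
            exact fun hpat => hpk hpat.symm
      · -- best part
        rw [hfold, hstep]
        dsimp only
        have hnil : (PySem.List.pyRange 0 (k : Int) 1).flatMap
            (fun i => if pvPat S i == pvPat S (k : Int) then [(k : Int) - i] else []) = [] := by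
          apply List.flatMap_eq_nil_iff.mpr
          intro i hi
          rw [PySem.List.mem_pyRange_one] at hi
          have := hnew i hi.1 hi.2
          simp [beq_iff_eq, this]
        rw [hcast, hmax, hnil, List.append_nil]
        exact hbest

theorem pv_funcB_eq_cands (S : String) :
    func_alt S = (pvCands S (PySem.Str.len S - 1)).foldl max (-1) := by
  have hB : func_alt S = ((PySem.List.pyRange 0 (PySem.Str.len S - 1) 1).foldl
      (pvStep S) (PySem.Dict.empty, -1)).2 := rfl
  by_cases hb : PySem.Str.len S - 1 ≤ 0
  · rw [hB, PySem.List.pyRange_one_eq_nil hb]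
    unfold pvCands
    rw [PySem.List.pyRange_one_eq_nil hb]
    rfl
  · have hk : PySem.Str.len S - 1 = ((PySem.Str.len S - 1).toNat : Int) := by omega
    rw [hB, hk]
    exact (pv_inv S (PySem.Str.len S - 1).toNat).2.2

-- ===== VERDICT (by name: the statement is the Claim_ definition above) =====
theorem func_spec : Claim_equal_func := by
  intro S _
  unfold Spec_func
  rw [pv_funcA_eq_cands, pv_funcB_eq_cands]
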